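-- pv_equiv track=rewrite | github.com/aryaadiputra/addons60_ptgbu_2013 | ad_po_form/report/purchase_order_form_report.py | _blank_line
-- ===== SOURCE A (Python) =====
-- def _blank_line(nlines, row, type):
--     res = ""
--     if type=="IDR":
--         if row > 1:
--             for i in range(nlines+1):
--                 res = res + ('<tr class="sub_line"><td>&nbsp;</td><td>&nbsp;</td><td>&nbsp;</td></tr>')
--         else:
--             for i in range(nlines - row):
--                 res = res + ('<tr class="sub_line"><td>&nbsp;</td><td>&nbsp;</td><td>&nbsp;</td></tr>')
--     else:
--         if row > 1:
--             for i in range(nlines+1):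
--                 res = res + ('<tr class="sub_line"><td>&nbsp;</td><td>&nbsp;</td><td>&nbsp;</td><td>&nbsp;</td></tr>')
--         else:
--             for i in range(nlines - row):
--                 res = res + ('<tr class="sub_line"><td>&nbsp;</td><td>&nbsp;</td><td>&nbsp;</td><td>&nbsp;</td></tr>')
--
--     return res
-- ===== SOURCE B (Python) =====
-- def _blank_line(nlines, row, type):
--     cell = "<td>&nbsp;</td>"
--     ncells = 3 if type == "IDR" else 4
--     template = '<tr class="sub_line">' + ncells * cell + "</tr>"
--     count = nlines + 1 if row > 1 else nlines - row
--     return count * template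
-- ===== Notes on version B (the rewrite author's own statement) =====
-- stated objective: simpler
-- what changed: B picks the row template (3 or 4 cells) and a repeat count once, then returns count * template by string multiplication (negative counts naturally give the empty string), replacing A's four-way branch with concatenation loops.
import Mathlib
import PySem

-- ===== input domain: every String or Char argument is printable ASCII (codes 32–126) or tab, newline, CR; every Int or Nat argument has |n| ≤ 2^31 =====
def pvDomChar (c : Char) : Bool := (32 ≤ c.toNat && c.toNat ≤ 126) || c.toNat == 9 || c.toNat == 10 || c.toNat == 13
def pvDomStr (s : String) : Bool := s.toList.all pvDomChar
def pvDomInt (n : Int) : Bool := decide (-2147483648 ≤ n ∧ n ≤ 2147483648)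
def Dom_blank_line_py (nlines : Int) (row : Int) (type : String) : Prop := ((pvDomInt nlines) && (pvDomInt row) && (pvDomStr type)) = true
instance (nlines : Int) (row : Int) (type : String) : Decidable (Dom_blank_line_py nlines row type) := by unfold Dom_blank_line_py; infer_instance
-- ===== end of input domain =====

-- B builds the row template once (3 or 4 cells) and returns count * template by string
-- multiplication instead of A's four concatenation loops; return value only, objective: simpler.

-- ===== PORT A =====
def pvRow3 : String := "<tr class=\"sub_line\"><td>&nbsp;</td><td>&nbsp;</td><td>&nbsp;</td></tr>"
def pvRow4 : String := "<tr class=\"sub_line\"><td>&nbsp;</td><td>&nbsp;</td><td>&nbsp;</td><td>&nbsp;</td></tr>"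

def blank_line_py (nlines : Int) (row : Int) (type : String) : String :=
  let res := ""
  if type == "IDR" then
    if row > 1 then
      (PySem.List.pyRange 0 (nlines + 1) 1).foldl (fun r _ => r ++ pvRow3) res
    else
      (PySem.List.pyRange 0 (nlines - row) 1).foldl (fun r _ => r ++ pvRow3) res
  else
    if row > 1 then
      (PySem.List.pyRange 0 (nlines + 1) 1).foldl (fun r _ => r ++ pvRow4) res
    else
      (PySem.List.pyRange 0 (nlines - row) 1).foldl (fun r _ => r ++ pvRow4) res

-- ===== PORT B =====
-- Python's `n * s` for an int n and string s (empty for n ≤ 0)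
def pvMulStr : Nat → String → String
  | 0, _ => ""
  | n + 1, s => s ++ pvMulStr n s

def blank_line_py_alt (nlines : Int) (row : Int) (type : String) : String :=
  let cell := "<td>&nbsp;</td>"
  let ncells : Nat := if type == "IDR" then 3 else 4
  let template := "<tr class=\"sub_line\">" ++ pvMulStr ncells cell ++ "</tr>"
  let count : Int := if row > 1 then nlines + 1 else nlines - row
  pvMulStr count.toNat template

-- ===== PRECONDITION & SPEC =====
def Spec_blank_line_py (nlines : Int) (row : Int) (type : String) (out : String) : Prop := out = blank_line_py_alt nlines row type
instance (nlines : Int) (row : Int) (type : String) (out : String) : Decidable (Spec_blank_line_py nlines row type out) := by unfold Spec_blank_line_py; infer_instance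

-- ===== CLAIM (what is proved, stated in full; the proofs are below) =====
def Claim_equal_blank_line_py : Prop := ∀ (nlines : Int) (row : Int) (type : String), Dom_blank_line_py nlines row type → Spec_blank_line_py nlines row type (blank_line_py nlines row type)

-- ===== LEMMAS AND PROOFS =====
theorem foldl_append_const_eq_pvMulStr (t : String) (l : List Int) (acc : String) :
    l.foldl (fun r _ => r ++ t) acc = acc ++ pvMulStr l.length t := by
  induction l generalizing acc with
  | nil => simp [pvMulStr]
  | cons x xs ih =>
    simp only [List.foldl_cons, List.length_cons, pvMulStr, ih, String.append_assoc]

theorem pvTemplate3 : "<tr class=\"sub_line\">" ++ pvMulStr 3 "<td>&nbsp;</td>" ++ "</tr>" = pvRow3 := by decide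
theorem pvTemplate4 : "<tr class=\"sub_line\">" ++ pvMulStr 4 "<td>&nbsp;</td>" ++ "</tr>" = pvRow4 := by decide

-- ===== VERDICT (by name: the statement is the Claim_ definition above) =====
theorem blank_line_py_spec : Claim_equal_blank_line_py := by
  intro nlines row type _
  show blank_line_py nlines row type = blank_line_py_alt nlines row type
  unfold blank_line_py blank_line_py_alt
  split_ifs with h1 h2 h2 <;>
    simp [foldl_append_const_eq_pvMulStr, PySem.List.length_pyRange_one, pvTemplate3, pvTemplate4]
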